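-- pv_equiv track=rewrite | github.com/DV59934/Rkis | 5 laba/2 task.py | SumAndMul
-- ===== SOURCE A (Python) =====
-- def SumAndMul(numbers):
--     positive_sum = sum(x for x in numbers if x > 0)
--
--     min_num = min(numbers)
--     max_num  = max(numbers)
--     min_index = numbers.index(min_num)
--     max_index = numbers.index(max_num)
--     start = min(min_index, max_index) + 1
--     end = max(min_index, max_index)
--
--     product = 1
--     for num in numbers[start:end]:
--         product *= num
--     return positive_sum, product
-- ===== SOURCE B (Python) =====
-- def SumAndMul(numbers):
--     # Sort the (index, value) pairs once by (value, index); then every quantity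
--     # is read off the sorted order with binary searches instead of linear scans.
--     asc = sorted(enumerate(numbers), key=lambda p: (p[1], p[0]))
--     vals = [p[1] for p in asc]
--
--     def first_ge(t):
--         # least position r with vals[r] >= t (vals is non-decreasing)
--         lo, hi = 0, len(vals)
--         while lo < hi:
--             mid = (lo + hi) // 2
--             if vals[mid] >= t:
--                 hi = mid
--             else:
--                 lo = mid + 1
--         return lo
--
--     min_index = asc[0][0]
--     max_index = asc[first_ge(vals[-1])][0]
--     positive_sum = sum(vals[first_ge(1):])
--
--     a, b = (min_index, max_index) if min_index < max_index else (max_index, min_index)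
--     product = 1
--     for x in numbers[a + 1:b]:
--         product *= x
--     return positive_sum, product
-- ===== Notes on version B (the rewrite author's own statement) =====
-- stated objective: alternative
-- what changed: B sorts the (index, value) pairs once and reads everything off the sorted order: the first pair gives the min index, a binary search to the start of the max-value block gives the max index (stability via the (value, index) key keeps first occurrences), and a second binary search finds the positive suffix whose sum is the positive sum; A instead makes five independent linear passes (sum comprehension, min, max, two .index scans).
-- outside the precondition, e.g. on SumAndMul([]): A raises ValueError, B raises IndexError
import Mathlib
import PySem

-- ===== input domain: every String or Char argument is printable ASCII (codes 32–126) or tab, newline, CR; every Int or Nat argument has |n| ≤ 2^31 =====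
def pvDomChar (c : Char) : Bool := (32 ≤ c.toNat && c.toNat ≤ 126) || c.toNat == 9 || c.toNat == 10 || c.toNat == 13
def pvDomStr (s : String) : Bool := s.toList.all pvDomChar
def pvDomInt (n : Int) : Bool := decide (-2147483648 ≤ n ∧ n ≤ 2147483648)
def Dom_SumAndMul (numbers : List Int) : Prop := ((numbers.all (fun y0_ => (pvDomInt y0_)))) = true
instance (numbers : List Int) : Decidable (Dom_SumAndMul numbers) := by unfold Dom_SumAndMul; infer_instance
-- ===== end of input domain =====

-- B replaces A's five linear passes by one stable sort of the (index, value) pairs plus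
-- binary searches that read min/max first-occurrence indices and the positive suffix off
-- the sorted order; return values proved equal on nonempty lists.

-- ===== PORT A =====
def SumAndMul (numbers : List Int) : Int × Int :=
  let positive_sum := numbers.foldl (fun s x => if x > 0 then s + x else s) 0
  match PySem.List.min? numbers (fun y => y), PySem.List.max? numbers (fun y => y) with
  | some min_num, some max_num =>
    match PySem.List.index? numbers min_num, PySem.List.index? numbers max_num with
    | some min_index, some max_index =>
      let start : Int := min (min_index : Int) (max_index : Int) + 1
      let stop : Int := max (min_index : Int) (max_index : Int)
      let product := (PySem.List.slice numbers (some start) (some stop)).foldl (· * ·) 1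
      (positive_sum, product)
    | _, _ => (0, 0)  -- unreachable: min/max are members of numbers
  | _, _ => (0, 0)    -- empty list: Python raises ValueError; excluded by Pre_

-- ===== PORT B =====
-- the inner `first_ge` while-loop of Source B: least r in [lo, hi) with vals[r] >= t (else hi)
def pvFirstGeLoop (vals : List Int) (t lo hi : Int) : Int :=
  if lo < hi then
    let mid := PySem.Int.floordiv (lo + hi) 2
    if t ≤ PySem.List.pyGetD vals mid 0 then pvFirstGeLoop vals t lo mid
    else pvFirstGeLoop vals t (mid + 1) hi
  else lo
termination_by (hi - lo).toNat
decreasing_by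
  all_goals
    simp only [PySem.Int.floordiv_eq_ediv_of_pos (show (0:Int) < 2 by omega)] at *
    omega

def SumAndMul_alt (numbers : List Int) : Int × Int :=
  let asc := PySem.List.sorted2 (PySem.List.enumerate numbers 0) (fun p => p.2) (fun p => p.1)
  let vals := asc.map (fun p => p.2)
  let min_index := (PySem.List.pyGetD asc 0 (0, 0)).1
  let max_index :=
    (PySem.List.pyGetD asc
      (pvFirstGeLoop vals (PySem.List.pyGetD vals (-1) 0) 0 (vals.length : Int)) (0, 0)).1
  let positive_sum :=
    (PySem.List.slice vals (some (pvFirstGeLoop vals 1 0 (vals.length : Int))) none).sum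
  let ab := if min_index < max_index then (min_index, max_index) else (max_index, min_index)
  let product := (PySem.List.slice numbers (some (ab.1 + 1)) (some ab.2)).foldl (· * ·) 1
  (positive_sum, product)

-- ===== PRECONDITION & SPEC =====
-- A raises ValueError (min of empty sequence) on []; B raises IndexError (asc[0]) there.
def Pre_SumAndMul (numbers : List Int) : Prop := numbers ≠ []
instance (numbers : List Int) : Decidable (Pre_SumAndMul numbers) := by unfold Pre_SumAndMul; infer_instance
def pvWitness_SumAndMul : List Int := [3, -1, 4]

def Spec_SumAndMul (numbers : List Int) (out : Int × Int) : Prop := out = SumAndMul_alt numbers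
instance (numbers : List Int) (out : Int × Int) : Decidable (Spec_SumAndMul numbers out) := by unfold Spec_SumAndMul; infer_instance

-- ===== CLAIM (what is proved, stated in full; the proofs are below) =====
def Claim_equal_SumAndMul : Prop := ∀ (numbers : List Int), Dom_SumAndMul numbers → Pre_SumAndMul numbers → Spec_SumAndMul numbers (SumAndMul numbers)

-- ===== LEMMAS AND PROOFS =====

-- the lexicographic order on (index, value) pairs that sorted2's (value, index) key produces
def pvLexLe (a b : Int × Int) : Prop := a.2 < b.2 ∨ (a.2 = b.2 ∧ a.1 ≤ b.1)

-- the comparison closure sorted2 uses for keys (p.2, p.1)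
def pvBf (a b : Int × Int) : Bool :=
  decide (a.2 < b.2) || (!decide (b.2 < a.2) && decide (a.1 < b.1))

theorem pvSorted2_eq (xs : List (Int × Int)) :
    PySem.List.sorted2 xs (fun p => p.2) (fun p => p.1)
      = xs.foldl (fun acc x => PySem.List.insertBy pvBf x acc) [] := rfl

theorem pvInsertBy_pairwise (x : Int × Int) (l : List (Int × Int))
    (h : l.Pairwise pvLexLe) : (PySem.List.insertBy pvBf x l).Pairwise pvLexLe := by
  induction l with
  | nil => simp [PySem.List.insertBy]
  | cons y ys ih =>
    rcases List.pairwise_cons.mp h with ⟨hy, hys⟩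
    by_cases hb : pvBf x y = true
    · rw [show PySem.List.insertBy pvBf x (y :: ys) = x :: y :: ys by
        simp [PySem.List.insertBy, hb]]
      have hxy : x.2 < y.2 ∨ (¬ y.2 < x.2 ∧ x.1 < y.1) := by
        simpa [pvBf, Bool.or_eq_true, Bool.and_eq_true] using hb
      refine List.pairwise_cons.mpr ⟨?_, h⟩
      intro z hz
      rcases List.mem_cons.mp hz with rfl | hz
      · unfold pvLexLe; omega
      · have := hy z hz
        unfold pvLexLe at *; omega
    · rw [show PySem.List.insertBy pvBf x (y :: ys) = y :: PySem.List.insertBy pvBf x ys by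
        simp [PySem.List.insertBy, hb]]
      refine List.pairwise_cons.mpr ⟨?_, ih hys⟩
      intro z hz
      rcases (PySem.List.mem_insertBy pvBf x z ys).mp hz with heq | hz
      · rw [heq]
        have hxy : ¬ (x.2 < y.2 ∨ (¬ y.2 < x.2 ∧ x.1 < y.1)) := by
          simpa [pvBf, Bool.or_eq_true, Bool.and_eq_true] using hb
        unfold pvLexLe; omega
      · exact hy z hz

theorem pvFoldl_insertBy_pairwise (xs : List (Int × Int)) :
    ∀ (acc : List (Int × Int)), acc.Pairwise pvLexLe →
      (xs.foldl (fun acc x => PySem.List.insertBy pvBf x acc) acc).Pairwise pvLexLe := by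
  induction xs with
  | nil => intro acc h; simpa using h
  | cons x t ih =>
    intro acc h
    exact ih _ (pvInsertBy_pairwise x acc h)

theorem pvMem_enumerate_iff {α : Type} (xs : List α) (s i : Int) (x : α) :
    (i, x) ∈ PySem.List.enumerate xs s ↔
      ∃ (k : Nat) (hk : k < xs.length), i = s + (k : Int) ∧ xs[k] = x := by
  induction xs generalizing s with
  | nil => simp [PySem.List.enumerate]
  | cons a t ih =>
    rw [PySem.List.enumerate_cons]
    constructor
    · intro hmem
      rcases List.mem_cons.mp hmem with heq | hmem
      · refine ⟨0, by simp, ?_, ?_⟩ <;> simp_all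
      · rcases (ih (s + 1)).mp hmem with ⟨k, hk, hi, hx⟩
        exact ⟨k + 1, by simpa using Nat.succ_lt_succ hk, by push_cast; omega, by simpa using hx⟩
    · rintro ⟨k, hk, hi, hx⟩
      cases k with
      | zero => simp at hx hi; subst hx; simp [hi]
      | succ k =>
        refine List.mem_cons.mpr (Or.inr ((ih (s + 1)).mpr ⟨k, by simpa using Nat.lt_of_succ_lt_succ (by simpa using hk), by push_cast at hi ⊢; omega, by simpa using hx⟩))

-- binary-search invariant: result is a Nat r with everything below < t and everything above >= t
theorem pvFirstGeLoop_eq_of_lt (vals : List Int) (t lo hi : Int) (h : lo < hi) :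
    pvFirstGeLoop vals t lo hi =
      if t ≤ PySem.List.pyGetD vals (PySem.Int.floordiv (lo + hi) 2) 0
      then pvFirstGeLoop vals t lo (PySem.Int.floordiv (lo + hi) 2)
      else pvFirstGeLoop vals t (PySem.Int.floordiv (lo + hi) 2 + 1) hi := by
  rw [pvFirstGeLoop]; simp [h]

theorem pvFirstGeLoop_eq_of_ge (vals : List Int) (t lo hi : Int) (h : ¬ lo < hi) :
    pvFirstGeLoop vals t lo hi = lo := by
  rw [pvFirstGeLoop]; simp [h]

theorem pvFirstGeLoop_spec (vals : List Int)
    (hmono : ∀ (p q : Nat) (hp : p < vals.length) (hq : q < vals.length), p ≤ q → vals[p] ≤ vals[q])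
    (t : Int) :
    ∀ (lo hi : Int), 0 ≤ lo → lo ≤ hi → hi ≤ (vals.length : Int) →
    (∀ (j : Nat) (hj : j < vals.length), (j : Int) < lo → vals[j] < t) →
    (∀ (j : Nat) (hj : j < vals.length), hi ≤ (j : Int) → t ≤ vals[j]) →
    ∃ r : Nat, pvFirstGeLoop vals t lo hi = (r : Int) ∧ r ≤ vals.length ∧
      (∀ (j : Nat) (hj : j < vals.length), j < r → vals[j] < t) ∧
      (∀ (j : Nat) (hj : j < vals.length), r ≤ j → t ≤ vals[j]) := by
  intro lo hi
  induction lo, hi using pvFirstGeLoop.induct vals t with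
  | case1 lo hi hlt mid hcond ih =>
    intro h0 hlh hhi hlow hhigh
    have hmid : mid = PySem.Int.floordiv (lo + hi) 2 := rfl
    rw [hmid] at hcond ih
    rw [pvFirstGeLoop_eq_of_lt vals t lo hi hlt, if_pos hcond]
    have hmidb : lo ≤ PySem.Int.floordiv (lo + hi) 2 ∧ PySem.Int.floordiv (lo + hi) 2 < hi := by
      rw [PySem.Int.floordiv_eq_ediv_of_pos (show (0:Int) < 2 by omega)]; omega
    refine ih h0 (by omega) (by omega) hlow ?_
    intro j hj hmj
    have hget : PySem.List.pyGetD vals (PySem.Int.floordiv (lo + hi) 2) 0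
        = vals[(PySem.Int.floordiv (lo + hi) 2).toNat] :=
      PySem.List.pyGetD_eq_getElem vals 0 (by omega) (by omega)
    have := hmono (PySem.Int.floordiv (lo + hi) 2).toNat j (by omega) hj (by omega)
    omega
  | case2 lo hi hlt mid hcond ih =>
    intro h0 hlh hhi hlow hhigh
    have hmid : mid = PySem.Int.floordiv (lo + hi) 2 := rfl
    rw [hmid] at hcond ih
    rw [pvFirstGeLoop_eq_of_lt vals t lo hi hlt, if_neg hcond]
    have hmidb : lo ≤ PySem.Int.floordiv (lo + hi) 2 ∧ PySem.Int.floordiv (lo + hi) 2 < hi := by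
      rw [PySem.Int.floordiv_eq_ediv_of_pos (show (0:Int) < 2 by omega)]; omega
    refine ih (by omega) (by omega) (by omega) ?_ hhigh
    intro j hj hjm
    have hget : PySem.List.pyGetD vals (PySem.Int.floordiv (lo + hi) 2) 0
        = vals[(PySem.Int.floordiv (lo + hi) 2).toNat] :=
      PySem.List.pyGetD_eq_getElem vals 0 (by omega) (by omega)
    have := hmono j (PySem.Int.floordiv (lo + hi) 2).toNat hj (by omega) (by omega)
    omega
  | case3 lo hi hnlt =>
    intro h0 hlh hhi hlow hhigh
    rw [pvFirstGeLoop_eq_of_ge vals t lo hi hnlt]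
    refine ⟨lo.toNat, by omega, by omega, ?_, ?_⟩
    · intro j hj hjr; exact hlow j hj (by omega)
    · intro j hj hrj; exact hhigh j hj (by omega)

theorem pvFoldl_if_pos_sum (xs : List Int) (s : Int) :
    xs.foldl (fun s x => if x > 0 then s + x else s) s
      = s + (xs.filter (fun x => decide (x > 0))).sum := by
  induction xs generalizing s with
  | nil => simp
  | cons x t ih =>
    by_cases hx : x > 0
    · simp [List.foldl_cons, hx, ih]; ring
    · simp [List.foldl_cons, hx, ih]

-- the pair found at the start of the value-v block of the sorted order is (first index of v, v)
theorem pvFirst_block_pair (numbers : List Int) (asc : List (Int × Int))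
    (hperm : asc.Perm (PySem.List.enumerate numbers 0)) (hpw : asc.Pairwise pvLexLe)
    (v : Int) (i : Nat) (hidx : PySem.List.index? numbers v = some i)
    (r : Nat) (hr : r < asc.length)
    (hlow : ∀ (j : Nat) (hj : j < asc.length), j < r → asc[j].2 ≠ v)
    (heq : asc[r].2 = v) : asc[r] = ((i : Int), v) := by
  obtain ⟨hi_lt, hiv, hfirst⟩ := PySem.List.getElem_of_index?_eq_some hidx
  have hmem_iv : ((i : Int), v) ∈ asc := by
    rw [hperm.mem_iff, pvMem_enumerate_iff]
    exact ⟨i, hi_lt, by omega, hiv⟩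
  obtain ⟨q, hq, hascq⟩ := List.getElem_of_mem hmem_iv
  have hrq : r ≤ q := by
    by_contra hqr
    exact hlow q hq (by omega) (by rw [hascq])
  have h1 : asc[r].1 ≤ (i : Int) := by
    rcases Nat.eq_or_lt_of_le hrq with rfl | hlt
    · rw [hascq]
    · have := List.pairwise_iff_getElem.mp hpw r q hr hq hlt
      rw [hascq] at this
      unfold pvLexLe at this
      simp only at this
      omega
  have h2 : (i : Int) ≤ asc[r].1 := by
    have hmem : asc[r] ∈ asc := List.getElem_mem hr
    rw [hperm.mem_iff] at hmem
    obtain ⟨k, hk, hk1, hk2⟩ := (pvMem_enumerate_iff numbers 0 asc[r].1 asc[r].2).mp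
      (by simpa using hmem)
    have hkv : numbers[k] = v := by rw [hk2, heq]
    have : ¬ k < i := fun hki => hfirst k hki hkv
    omega
  have : asc[r].1 = (i : Int) := le_antisymm h1 h2
  exact Prod.ext this heq

theorem pvDropSum_eq_filterSum (vals : List Int) (p : Nat)
    (hlow : ∀ (j : Nat) (hj : j < vals.length), j < p → vals[j] < 1)
    (hhigh : ∀ (j : Nat) (hj : j < vals.length), p ≤ j → 1 ≤ vals[j]) :
    (vals.drop p).sum = (vals.filter (fun x => decide (x > 0))).sum := by
  conv_rhs => rw [← List.take_append_drop p vals]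
  rw [List.filter_append]
  have h1 : (vals.take p).filter (fun x => decide (x > 0)) = [] := by
    rw [List.filter_eq_nil_iff]
    intro a ha
    obtain ⟨i, hi, hieq⟩ := List.getElem_of_mem ha
    have hilen : i < vals.length := by
      have := hi; simp [List.length_take] at this; omega
    have hip : i < p := by
      have := hi; simp [List.length_take] at this; omega
    have : vals[i] = a := by rw [← hieq, List.getElem_take]
    have := hlow i hilen hip
    simp; omega
  have h2 : (vals.drop p).filter (fun x => decide (x > 0)) = vals.drop p := by
    rw [List.filter_eq_self]
    intro a ha
    obtain ⟨i, hi, hieq⟩ := List.getElem_of_mem ha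
    have hilen : p + i < vals.length := by
      have := hi; simp [List.length_drop] at this; omega
    have : vals[p + i] = a := by rw [← hieq, List.getElem_drop]
    have := hhigh (p + i) hilen (by omega)
    simp; omega
  rw [h1, h2, List.nil_append]

-- ===== VERDICT (by name: the statement is the Claim_ definition above) =====
theorem SumAndMul_spec : Claim_equal_SumAndMul := by
  intro numbers _ hpre
  unfold Spec_SumAndMul
  -- A-side extremal data
  obtain ⟨mn, hmn⟩ : ∃ mn, PySem.List.min? numbers (fun y => y) = some mn := by
    cases numbers with
    | nil => exact absurd rfl hpre
    | cons a t => rw [PySem.List.min?_id_cons]; exact ⟨_, rfl⟩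
  obtain ⟨mx, hmx⟩ : ∃ mx, PySem.List.max? numbers (fun y => y) = some mx := by
    cases numbers with
    | nil => exact absurd rfl hpre
    | cons a t => rw [PySem.List.max?_id_cons]; exact ⟨_, rfl⟩
  obtain ⟨mi, hmi⟩ : ∃ mi, PySem.List.index? numbers mn = some mi :=
    Option.isSome_iff_exists.mp
      ((PySem.List.index?_isSome_iff numbers mn).mpr (PySem.List.min?_mem hmn))
  obtain ⟨xi, hxi⟩ : ∃ xi, PySem.List.index? numbers mx = some xi :=
    Option.isSome_iff_exists.mp
      ((PySem.List.index?_isSome_iff numbers mx).mpr (PySem.List.max?_mem hmx))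
  obtain ⟨hmi_lt, hmi_v, hmi_first⟩ := PySem.List.getElem_of_index?_eq_some hmi
  obtain ⟨hxi_lt, hxi_v, hxi_first⟩ := PySem.List.getElem_of_index?_eq_some hxi
  have hmn_min : ∀ y ∈ numbers, mn ≤ y := PySem.List.min?_isMin hmn
  have hmx_max : ∀ y ∈ numbers, y ≤ mx := PySem.List.max?_isMax hmx
  have hnn : 0 < numbers.length := List.length_pos_iff.mpr hpre
  -- B-side structures
  set asc := PySem.List.sorted2 (PySem.List.enumerate numbers 0) (fun p => p.2) (fun p => p.1)
    with hasc
  have hperm : asc.Perm (PySem.List.enumerate numbers 0) :=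
    PySem.List.sorted2_perm (PySem.List.enumerate numbers 0) (fun p => p.2) (fun p => p.1) false
  have hpw : asc.Pairwise pvLexLe := by
    rw [hasc, pvSorted2_eq]
    exact pvFoldl_insertBy_pairwise _ [] List.Pairwise.nil
  have hlen : asc.length = numbers.length := by
    rw [hperm.length_eq, PySem.List.length_enumerate]
  set vals := asc.map (fun p => p.2) with hvals
  have hvlen : vals.length = numbers.length := by rw [hvals, List.length_map, hlen]
  have hvperm : vals.Perm numbers := by
    have := hperm.map (fun p : Int × Int => p.2)
    rwa [PySem.List.map_snd_enumerate] at this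
  have hvget : ∀ (j : Nat) (hj : j < vals.length),
      vals[j] = (asc[j]'(by omega)).2 := by
    intro j hj
    simp [hvals]
  have hmono : ∀ (p q : Nat) (hp : p < vals.length) (hq : q < vals.length),
      p ≤ q → vals[p] ≤ vals[q] := by
    intro p q hp hq hpq
    rcases Nat.eq_or_lt_of_le hpq with rfl | hlt
    · exact le_refl _
    · have := List.pairwise_iff_getElem.mp hpw p q (by omega) (by omega) hlt
      unfold pvLexLe at this
      rw [hvget p hp, hvget q hq]
      omega
  have hmem_asc : ∀ y ∈ asc, ∃ (k : Nat) (hk : k < numbers.length),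
      y = ((k : Int), numbers[k]) := by
    intro y hy
    rw [hperm.mem_iff] at hy
    obtain ⟨i2, x2⟩ := y
    obtain ⟨k, hk, h1, h2⟩ := (pvMem_enumerate_iff numbers 0 i2 x2).mp hy
    exact ⟨k, hk, by subst h2; simp [h1]⟩
  have h0lt : 0 < asc.length := by omega
  -- the head of the sorted order is (first index of min, min)
  have hmem_minpair : ((mi : Int), mn) ∈ asc := by
    rw [hperm.mem_iff, pvMem_enumerate_iff]
    exact ⟨mi, hmi_lt, by omega, hmi_v⟩
  have heq0 : (asc[0]'h0lt).2 = mn := by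
    have hge : mn ≤ (asc[0]'h0lt).2 := by
      obtain ⟨k, hk, hk2⟩ := hmem_asc (asc[0]'h0lt) (List.getElem_mem h0lt)
      rw [hk2]
      exact hmn_min _ (List.getElem_mem hk)
    obtain ⟨q, hq, hascq⟩ := List.getElem_of_mem hmem_minpair
    have hle : (asc[0]'h0lt).2 ≤ mn := by
      rcases Nat.eq_zero_or_pos q with rfl | hqpos
      · rw [hascq]
      · have := List.pairwise_iff_getElem.mp hpw 0 q h0lt hq hqpos
        rw [hascq] at this
        unfold pvLexLe at this
        simp only at this
        omega
    omega
  have hmin_pair : asc[0]'h0lt = ((mi : Int), mn) :=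
    pvFirst_block_pair numbers asc hperm hpw mn mi hmi 0 h0lt
      (fun j hj hj0 => absurd hj0 (Nat.not_lt_zero j)) heq0
  -- vals[-1] is the max
  have hvne : vals ≠ [] := by
    intro h
    rw [h] at hvlen
    simp at hvlen
    omega
  have hmxvals : mx ∈ vals := hvperm.mem_iff.mpr (PySem.List.max?_mem hmx)
  obtain ⟨q2, hq2, hq2e⟩ := List.getElem_of_mem hmxvals
  have hlast : PySem.List.pyGetD vals (-1) 0 = mx := by
    rw [PySem.List.pyGetD_neg_one vals 0 hvne, List.getLast_eq_getElem hvne]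
    have h1 : vals[vals.length - 1]'(by omega) ≤ mx :=
      hmx_max _ (hvperm.subset (List.getElem_mem (by omega)))
    have h2 : mx ≤ vals[vals.length - 1]'(by omega) := by
      rw [← hq2e]
      exact hmono q2 (vals.length - 1) hq2 (by omega) (by omega)
    omega
  -- binary search for the start of the max block
  obtain ⟨r, hrEq, hrle, hrlow, hrhigh⟩ :=
    pvFirstGeLoop_spec vals hmono mx 0 (vals.length : Int) (by omega) (by omega) (by omega)
      (fun j hj hj0 => absurd hj0 (by omega)) (fun j hj hjl => absurd hjl (by omega))
  have hr_lt : r < vals.length := by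
    by_contra h
    have := hrlow q2 hq2 (by omega)
    omega
  have heqr : (asc[r]'(by omega)).2 = mx := by
    have hge := hrhigh r hr_lt (le_refl r)
    have hle : vals[r] ≤ mx := hmx_max _ (hvperm.subset (List.getElem_mem hr_lt))
    rw [← hvget r hr_lt]
    omega
  have hmax_pair : asc[r]'(by omega) = ((xi : Int), mx) := by
    apply pvFirst_block_pair numbers asc hperm hpw mx xi hxi r (by omega) ?_ heqr
    intro j hj hjr
    have := hrlow j (by omega) hjr
    rw [← hvget j (by omega)] at *
    omega
  -- binary search for the positive suffix
  obtain ⟨p, hpEq, hple, hplow, hphigh⟩ :=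
    pvFirstGeLoop_spec vals hmono 1 0 (vals.length : Int) (by omega) (by omega) (by omega)
      (fun j hj hj0 => absurd hj0 (by omega)) (fun j hj hjl => absurd hjl (by omega))
  have hsum : (PySem.List.slice vals (some ((p : Nat) : Int)) none).sum
      = numbers.foldl (fun s x => if x > 0 then s + x else s) 0 := by
    rw [PySem.List.slice_from_natCast vals p,
        pvDropSum_eq_filterSum vals p hplow hphigh,
        pvFoldl_if_pos_sum numbers 0]
    rw [((hvperm.filter (fun x => decide (x > 0))).sum_eq)]
    omega
  -- assemble both sides
  have hget0 : PySem.List.pyGetD asc 0 ((0 : Int), (0 : Int)) = ((mi : Int), mn) := by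
    rw [PySem.List.pyGetD_zero, List.getD_eq_getElem asc _ h0lt, hmin_pair]
  have hgetr : PySem.List.pyGetD asc ((r : Nat) : Int) ((0 : Int), (0 : Int))
      = ((xi : Int), mx) := by
    rw [PySem.List.pyGetD_natCast, List.getD_eq_getElem asc _ (by omega), hmax_pair]
  simp only [SumAndMul, SumAndMul_alt, hmn, hmx, hmi, hxi, ← hasc, ← hvals,
    hlast, hrEq, hpEq, hget0, hgetr, hsum]
  -- the (min, max) pair of indices and the product slice
  have hab : (if ((mi : Nat) : Int) < ((xi : Nat) : Int)
        then (((mi : Nat) : Int), ((xi : Nat) : Int))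
        else (((xi : Nat) : Int), ((mi : Nat) : Int)))
      = (min ((mi : Nat) : Int) ((xi : Nat) : Int), max ((mi : Nat) : Int) ((xi : Nat) : Int)) := by
    split_ifs with h
    · rw [min_eq_left (by omega), max_eq_right (by omega)]
    · rw [min_eq_right (by omega), max_eq_left (by omega)]
  rw [hab]
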